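-- pv_equiv track=rewrite | github.com/xupeng211/FootballPrediction | scripts/maintenance/fix_import_issues.py | fix_complex_imports
-- ===== SOURCE A (Python) =====
-- def fix_complex_imports(content: str) -> str:
--     """修复复杂的导入问题"""
--     lines = content.split("\n")
--     fixed_lines = []
--     in_import_block = False
--     import_block_lines = []
--
--     for line in lines:
--         stripped_line = line.strip()
--
--         # 检查是否是导入语句（包括缩进的）
--         if stripped_line.startswith("import ") or stripped_line.startswith("from "):
--             in_import_block = True
--             import_block_lines.append(stripped_line)
--         else:
--             # 如果之前有导入块，先处理导入块
--             if in_import_block and import_block_lines: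
--                 # 过滤掉空行和无效的导入语句
--                 valid_imports = []
--                 for import_line in import_block_lines:
--                     if (
--                         import_line
--                         and not import_line.startswith("from ")
--                         and not import_line.startswith("import ")
--                     ):
--                         continue
--
--                     # 检查是否是完整的导入语句
--                     if (
--                         import_line.startswith("from ")
--                         and " import " not in import_line
--                     ):
--                         continue
--
--                     if import_line.startswith("import ") and import_line == "import":
--                         continue
--
--                     valid_imports.append(import_line)
--
--                 # 添加有效的导入语句
--                 for import_line in valid_imports:
--                     fixed_lines.append(import_line)
--
--                 import_block_lines = []
--                 in_import_block = False
--
--             # 添加非导入行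
--             fixed_lines.append(line)
--
--     # 处理最后剩余的导入块
--     if in_import_block and import_block_lines:
--         valid_imports = []
--         for import_line in import_block_lines:
--             if (
--                 import_line
--                 and not import_line.startswith("from ")
--                 and not import_line.startswith("import ")
--             ):
--                 continue
--
--             if import_line.startswith("from ") and " import " not in import_line:
--                 continue
--
--             if import_line.startswith("import ") and import_line == "import":
--                 continue
--
--             valid_imports.append(import_line)
--
--         for import_line in valid_imports:
--             fixed_lines.append(import_line)
--
--     return "\n".join(fixed_lines)
-- ===== SOURCE B (Python) =====
-- def fix_complex_imports(content: str) -> str: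
--     """修复复杂的导入问题"""
--     out = []
--     for line in content.split("\n"):
--         s = line.strip()
--         if s.startswith("import ") or s.startswith("from "):
--             if s.startswith("from ") and " import " not in s:
--                 continue
--             out.append(s)
--         else:
--             out.append(line)
--     return "\n".join(out)
-- ===== Notes on version B (the rewrite author's own statement) =====
-- stated objective: simpler
-- what changed: Drops A's in_import_block flag, buffer list and the two flush-time filtering passes: B decides each line independently in one pass (emit the stripped import line unless it is a 'from ' line without ' import ', else the original line), which is correct because A's buffer never does cross-line work.
import Mathlib
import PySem

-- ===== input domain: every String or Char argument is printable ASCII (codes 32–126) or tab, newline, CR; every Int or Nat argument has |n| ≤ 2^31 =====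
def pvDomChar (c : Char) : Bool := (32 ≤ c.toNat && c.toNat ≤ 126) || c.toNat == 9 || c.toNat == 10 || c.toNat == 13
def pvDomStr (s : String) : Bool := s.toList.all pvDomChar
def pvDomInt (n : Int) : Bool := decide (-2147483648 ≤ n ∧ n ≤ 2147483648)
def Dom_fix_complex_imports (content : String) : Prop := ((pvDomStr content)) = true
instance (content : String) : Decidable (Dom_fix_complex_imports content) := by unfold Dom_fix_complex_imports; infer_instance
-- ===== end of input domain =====

-- B removes A's import-block buffer/flag and its flush-time filtering passes, deciding each line
-- independently in a single pass (objective: simpler). Return values proved equal on all inputs.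


-- ===== PORT A =====
-- A's inner validity filter over a buffered import block (both flush sites run this same code).
def fixFilterStep (acc : List String) (s : String) : List String :=
  if (s != "" && !(PySem.Str.startswith s "from ") && !(PySem.Str.startswith s "import ")) then acc
  else if (PySem.Str.startswith s "from " && !(PySem.Str.isIn " import " s)) then acc
  else if (PySem.Str.startswith s "import " && s == "import") then acc
  else acc ++ [s]

def fixValid (block : List String) : List String :=
  block.foldl fixFilterStep []

-- One iteration of A's main loop; state = (fixed_lines, in_import_block, import_block_lines).
def stepA (st : List String × Bool × List String) (line : String) : List String × Bool × List String :=
  let s := PySem.Str.strip line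
  if (PySem.Str.startswith s "import " || PySem.Str.startswith s "from ") then
    (st.1, true, st.2.2 ++ [s])
  else if (st.2.1 && !st.2.2.isEmpty) then
    (st.1 ++ fixValid st.2.2 ++ [line], false, [])
  else
    (st.1 ++ [line], st.2.1, st.2.2)

-- A's trailing "handle the remaining import block".
def finalizeA (st : List String × Bool × List String) : List String :=
  if (st.2.1 && !st.2.2.isEmpty) then st.1 ++ fixValid st.2.2 else st.1

def fix_complex_imports (content : String) : String :=
  PySem.Str.join "\n" (finalizeA ((((PySem.Str.split? content "\n").getD []).foldl stepA ([], false, []))))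

-- ===== PORT B =====
-- B's per-line decision: 0 or 1 output lines per input line.
def altLine (line : String) : List String :=
  let s := PySem.Str.strip line
  if (PySem.Str.startswith s "import " || PySem.Str.startswith s "from ") then
    if (PySem.Str.startswith s "from " && !(PySem.Str.isIn " import " s)) then []
    else [s]
  else [line]

def fix_complex_imports_alt (content : String) : String :=
  PySem.Str.join "\n" (((PySem.Str.split? content "\n").getD []).flatMap altLine)

-- ===== PRECONDITION & SPEC =====
def Spec_fix_complex_imports (content : String) (out : String) : Prop := out = fix_complex_imports_alt content
instance (content : String) (out : String) : Decidable (Spec_fix_complex_imports content out) := by unfold Spec_fix_complex_imports; infer_instance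

-- ===== CLAIM (what is proved, stated in full; the proofs are below) =====
def Claim_equal_fix_complex_imports : Prop := ∀ (content : String), Dom_fix_complex_imports content → Spec_fix_complex_imports content (fix_complex_imports content)

-- ===== LEMMAS AND PROOFS =====

-- A's filter keeps an import-prefixed line iff B's per-line rule does.
lemma fixFilterStep_import (acc : List String) (s : String)
    (h : (PySem.Str.startswith s "import " || PySem.Str.startswith s "from ") = true) :
    fixFilterStep acc s =
      acc ++ (if (PySem.Str.startswith s "from " && !(PySem.Str.isIn " import " s)) then [] else [s]) := by
  unfold fixFilterStep
  rcases Bool.or_eq_true_iff.mp h with h1 | h1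
  · have hne : s ≠ "import" := by
      intro hs; subst hs; exact absurd h1 (by decide)
    simp at h1
    simp [h1, hne]
    split <;> simp
  · simp at h1
    have hne : s ≠ "import" := by intro hs; subst hs; exact absurd h1 (by decide)
    simp [h1, hne]
    split <;> simp

lemma fixValid_append_import (block : List String) (s : String)
    (h : (PySem.Str.startswith s "import " || PySem.Str.startswith s "from ") = true) :
    fixValid (block ++ [s]) = fixValid block ++
      (if (PySem.Str.startswith s "from " && !(PySem.Str.isIn " import " s)) then [] else [s]) := by
  unfold fixValid
  rw [List.foldl_append]
  simp only [List.foldl_cons, List.foldl_nil]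
  exact fixFilterStep_import _ s h

-- Loop invariant: from any state whose flag equals "buffer nonempty", A's remaining loop + final
-- flush produces exactly the already-fixed lines, the filtered buffer, then B's output of the rest.
lemma loopA_eq (lines : List String) : ∀ (fixed block : List String),
    finalizeA (lines.foldl stepA (fixed, !block.isEmpty, block)) =
      fixed ++ fixValid block ++ lines.flatMap altLine := by
  induction lines with
  | nil =>
    intro fixed block
    cases block <;> simp [finalizeA, fixValid]
  | cons line rest ih =>
    intro fixed block
    simp only [List.foldl_cons, List.flatMap_cons]
    by_cases h : (PySem.Str.startswith (PySem.Str.strip line) "import "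
        || PySem.Str.startswith (PySem.Str.strip line) "from ") = true
    · have halt : altLine line =
          (if (PySem.Str.startswith (PySem.Str.strip line) "from "
              && !(PySem.Str.isIn " import " (PySem.Str.strip line))) then []
           else [PySem.Str.strip line]) := by
        unfold altLine
        rcases Bool.or_eq_true_iff.mp h with h1 | h1 <;> · simp at h1; simp [h1]
      have hstep : stepA (fixed, !block.isEmpty, block) line =
          (fixed, !(block ++ [PySem.Str.strip line]).isEmpty, block ++ [PySem.Str.strip line]) := by
        unfold stepA
        rcases Bool.or_eq_true_iff.mp h with h1 | h1 <;> · simp at h1; simp [h1]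
      rw [hstep, ih fixed (block ++ [PySem.Str.strip line]),
        fixValid_append_import block _ h, halt]
      simp
    · simp [not_or] at h
      have halt : altLine line = [line] := by
        unfold altLine; simp [h.1, h.2]
      rcases eq_or_ne block [] with hb | hb
      · subst hb
        have hstep : stepA (fixed, !([] : List String).isEmpty, []) line =
            (fixed ++ [line], !([] : List String).isEmpty, ([] : List String)) := by
          unfold stepA; simp [h.1, h.2]
        rw [hstep, ih (fixed ++ [line]) [], halt]
        simp [fixValid]
      · have hstep : stepA (fixed, !block.isEmpty, block) line =
            (fixed ++ fixValid block ++ [line], !([] : List String).isEmpty, ([] : List String)) := by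
          unfold stepA; simp [h.1, h.2, List.isEmpty_eq_false_iff.mpr hb]
        rw [hstep, ih (fixed ++ fixValid block ++ [line]) [], halt]
        simp [fixValid]

-- ===== VERDICT (by name: the statement is the Claim_ definition above) =====
theorem fix_complex_imports_spec : Claim_equal_fix_complex_imports := by
  intro content _
  unfold Spec_fix_complex_imports fix_complex_imports fix_complex_imports_alt
  have h0 : (([] : List String), false, ([] : List String)) =
      (([] : List String), !([] : List String).isEmpty, ([] : List String)) := by simp
  rw [h0, loopA_eq]
  simp [fixValid]
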